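-- pv_equiv track=rewrite | github.com/alex343425/otogibot | bot/idparse.py | isinand
-- ===== SOURCE A (Python) =====
-- def isinand(kw,sentence):
--     for k in kw:
--         if k.startswith('-'):
--             if k[1:] in sentence.lower():
--                 return False
--         else:
--             if k not in sentence.lower():
--                 return False
--     return True
-- ===== SOURCE B (Python) =====
-- def isinand(kw, sentence):
--     lower = sentence.lower()
--     need = {}
--     for k in kw:
--         if k.startswith('-'):
--             t, p = k[1:], False
--         else:
--             t, p = k, True
--         if need.setdefault(t, p) != p:
--             return False
--     return all((t in lower) == p for t, p in need.items())
-- ===== Notes on version B (the rewrite author's own statement) =====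
-- stated objective: alternative
-- what changed: Replaces the per-keyword early-return scan by building a dict from stripped keyword to required polarity (early False on a conflicting +/- pair), then one membership test per distinct keyword against the sentence lowercased once; it trades the single branching pass for an index-then-check structure.
import Mathlib
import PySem

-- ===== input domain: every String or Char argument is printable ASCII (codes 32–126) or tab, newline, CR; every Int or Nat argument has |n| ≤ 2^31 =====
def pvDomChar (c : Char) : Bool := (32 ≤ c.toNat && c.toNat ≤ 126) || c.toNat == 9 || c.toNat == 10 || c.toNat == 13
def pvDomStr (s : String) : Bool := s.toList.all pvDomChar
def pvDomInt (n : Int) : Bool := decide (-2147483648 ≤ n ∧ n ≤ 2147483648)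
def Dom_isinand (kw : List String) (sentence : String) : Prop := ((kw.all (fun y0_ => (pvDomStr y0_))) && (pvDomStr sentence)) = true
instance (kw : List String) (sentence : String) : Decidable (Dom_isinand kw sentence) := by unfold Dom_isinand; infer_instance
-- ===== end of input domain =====

-- B groups keywords into a dict (stripped text -> required polarity, early False on a conflict)
-- and then does one membership test per distinct stripped keyword on the sentence lowercased once.

-- ===== PORT A =====
-- A: one loop over kw, early return False on a failing keyword (sentence.lower() recomputed each check).
def isinandLoop : List String → String → Bool
  | [], _ => true
  | k :: rest, sentence =>
    if PySem.Str.startswith k "-" then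
      if PySem.Str.isIn (PySem.Str.slice k (some 1) none) (PySem.Str.lower sentence) then false
      else isinandLoop rest sentence
    else
      if !(PySem.Str.isIn k (PySem.Str.lower sentence)) then false
      else isinandLoop rest sentence

def isinand (kw : List String) (sentence : String) : Bool := isinandLoop kw sentence

-- ===== PORT B =====
-- the loop of Source B: builds need; none = the early 'return False' on need.setdefault(t, p) != p
def altBuild : List String → PySem.Dict String Bool → Option (PySem.Dict String Bool)
  | [], need => some need
  | k :: rest, need =>
    let tp : String × Bool :=
      if PySem.Str.startswith k "-" then (PySem.Str.slice k (some 1) none, false) else (k, true)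
    let v := (need.get? tp.1).getD tp.2        -- value returned by need.setdefault(t, p)
    let need' := need.setdefault tp.1 tp.2
    if v != tp.2 then none else altBuild rest need'

def isinand_alt (kw : List String) (sentence : String) : Bool :=
  let lower := PySem.Str.lower sentence
  match altBuild kw PySem.Dict.empty with
  | none => false
  | some need => need.items.all (fun tp => (PySem.Str.isIn tp.1 lower) == tp.2)

-- ===== PRECONDITION & SPEC =====
def Spec_isinand (kw : List String) (sentence : String) (out : Bool) : Prop := out = isinand_alt kw sentence
instance (kw : List String) (sentence : String) (out : Bool) : Decidable (Spec_isinand kw sentence out) := by unfold Spec_isinand; infer_instance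

-- ===== CLAIM (what is proved, stated in full; the proofs are below) =====
def Claim_equal_isinand : Prop := ∀ (kw : List String) (sentence : String), Dom_isinand kw sentence → Spec_isinand kw sentence (isinand kw sentence)

-- ===== LEMMAS AND PROOFS =====

-- stripped text and required polarity of a keyword
def pvReq (k : String) : String × Bool :=
  if PySem.Str.startswith k "-" then (PySem.Str.slice k (some 1) none, false) else (k, true)

-- "this (text, polarity) requirement holds of the lowered sentence L"
def pvEc (L : String) (tp : String × Bool) : Bool := PySem.Str.isIn tp.1 L == tp.2

theorem isinandLoop_eq_all (kw : List String) (s : String) :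
    isinandLoop kw s = kw.all (fun k => pvEc (PySem.Str.lower s) (pvReq k)) := by
  induction kw with
  | nil => simp [isinandLoop]
  | cons k rest ih =>
    simp only [isinandLoop, List.all_cons, ih]
    by_cases hs : PySem.Str.startswith k "-" = true
    · simp only [pvEc, pvReq, hs, if_true]
      cases PySem.Str.isIn (PySem.Str.slice k (some 1) none) (PySem.Str.lower s) <;> simp
    · simp only [pvEc, pvReq, hs, if_false, Bool.false_eq_true]
      cases PySem.Str.isIn k (PySem.Str.lower s) <;> simp

theorem altBuild_all (L : String) (kw : List String) (need : PySem.Dict String Bool)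
    (hnd : need.keys.Nodup) :
    (match altBuild kw need with
     | none => false
     | some d => d.items.all (pvEc L)) =
    (need.items.all (pvEc L) && kw.all (fun k => pvEc L (pvReq k))) := by
  induction kw generalizing need with
  | nil => simp [altBuild]
  | cons k rest ih =>
    rcases hreq : pvReq k with ⟨t, p⟩
    have hbranch : (if PySem.Str.startswith k "-" then
        ((PySem.Str.slice k (some 1) none : String), false) else (k, true)) = (t, p) := by
      simpa [pvReq] using hreq
    cases hget : need.get? t with
    | none =>
      have hc : need.contains t = false := by
        rw [PySem.Dict.contains_eq_isSome_get?, hget]; rfl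
      have hsd : need.setdefault t p = need.insert t p :=
        PySem.Dict.setdefault_of_not_contains need p hc
      have hnd' : (need.insert t p).keys.Nodup := PySem.Dict.nodup_keys_insert need t p hnd
      have hitems : (need.insert t p).items = need.items ++ [(t, p)] :=
        PySem.Dict.items_insert_of_not_contains need p hc
      simp only [altBuild, hbranch, hget, hsd, Option.getD, bne_self_eq_false,
        Bool.false_eq_true, if_false]
      rw [ih (need.insert t p) hnd', hitems]
      simp only [List.all_append, List.all_cons, List.all_nil, Bool.and_true, hreq]
      rw [Bool.and_assoc, Bool.and_left_comm]
    | some q =>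
      have hmem : (t, q) ∈ need.items := PySem.Dict.mem_items_of_get?_eq_some need hget
      have hc : need.contains t = true := by
        rw [PySem.Dict.contains_eq_isSome_get?, hget]; rfl
      have hsd : need.setdefault t p = need := PySem.Dict.setdefault_of_contains need p hc
      simp only [altBuild, hbranch, hget, hsd, Option.getD]
      by_cases hqp : q = p
      · subst hqp
        simp only [bne_self_eq_false, Bool.false_eq_true, if_false]
        rw [ih need hnd]
        simp only [List.all_cons, hreq]
        by_cases hall : need.items.all (pvEc L) = true
        · have hq := List.all_eq_true.mp hall _ hmem
          simp [hall, hq]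
        · simp [Bool.eq_false_iff.mpr hall]
      · have hne : (q != p) = true := by simp [hqp]
        simp only [hne, if_true]
        symm
        simp only [List.all_cons, hreq, Bool.and_eq_false_iff]
        by_cases hall : need.items.all (pvEc L) = true
        · have hq := List.all_eq_true.mp hall _ hmem
          right; left
          cases q <;> cases p <;> simp_all [pvEc]
        · left; exact Bool.eq_false_iff.mpr hall

theorem alt_eq_all (kw : List String) (s : String) :
    isinand_alt kw s = kw.all (fun k => pvEc (PySem.Str.lower s) (pvReq k)) := by
  have h := altBuild_all (PySem.Str.lower s) kw PySem.Dict.empty PySem.Dict.nodup_keys_empty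
  rw [show (PySem.Dict.empty : PySem.Dict String Bool).items = [] from rfl] at h
  simp only [List.all_nil, Bool.true_and] at h
  unfold pvEc at h
  cases hb : altBuild kw PySem.Dict.empty with
  | none => rw [hb] at h; simpa [isinand_alt, hb, pvEc] using h
  | some d => rw [hb] at h; simpa [isinand_alt, hb, pvEc] using h

-- ===== VERDICT (by name: the statement is the Claim_ definition above) =====
theorem isinand_spec : Claim_equal_isinand := by
  intro kw sentence _
  unfold Spec_isinand isinand
  rw [isinandLoop_eq_all, alt_eq_all]
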